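-- pv_equiv track=rewrite | github.com/openharmonyinsight/openharmony-skills | skills/openharmony-ci/scripts/openharmony_ci.py | infer_overall_result
-- ===== SOURCE A (Python) =====
-- from typing import Any, Dict, List, Optional, Sequence, Tuple
--
-- SUCCESS_RESULTS = {"success", "passed", "pass"}
--
-- FAILURE_RESULTS = {"failed", "fail", "error", "canceled", "cancelled", "skip", "skipped"}
--
-- def is_failure_result(result: str) -> bool:
--     return str(result).lower() in FAILURE_RESULTS
--
-- def infer_overall_result(raw_result: str, jobs: List[Dict[str, Any]]) -> str:
--     result = str(raw_result or "").strip().lower()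
--     if result:
--         return result
--     job_results = [str(job.get("result", "")).lower() for job in jobs]
--     if any(is_failure_result(item) for item in job_results):
--         return "failed"
--     if any(item == "running" for item in job_results):
--         return "running"
--     if any(item == "pending" for item in job_results):
--         return "pending"
--     if job_results and all(item in SUCCESS_RESULTS for item in job_results):
--         return "success"
--     return "unknown"
-- ===== SOURCE B (Python) =====
-- from typing import Any, Dict, List
--
-- SUCCESS_RESULTS = {"success", "passed", "pass"}
--
-- FAILURE_RESULTS = {"failed", "fail", "error", "canceled", "cancelled", "skip", "skipped"}
--
--
-- def infer_overall_result(raw_result: str, jobs: List[Dict[str, Any]]) -> str: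
--     result = str(raw_result or "").strip().lower()
--     if result:
--         return result
--     has_failure = has_running = has_pending = saw_any = False
--     all_success = True
--     for job in jobs:
--         r = str(job.get("result", "")).lower()
--         saw_any = True
--         if r in FAILURE_RESULTS:
--             has_failure = True
--         elif r == "running":
--             has_running = True
--         elif r == "pending":
--             has_pending = True
--         all_success = all_success and r in SUCCESS_RESULTS
--     if has_failure:
--         return "failed"
--     if has_running:
--         return "running"
--     if has_pending:
--         return "pending"
--     if saw_any and all_success:
--         return "success"
--     return "unknown"
-- ===== Notes on version B (the rewrite author's own statement) =====
-- stated objective: alternative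
-- what changed: Replaces the list comprehension plus four separate any/all scans over the job results with a single accumulating pass over jobs that maintains failure/running/pending/seen/all-success flags and decides by the same priority order afterwards.
import Mathlib
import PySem

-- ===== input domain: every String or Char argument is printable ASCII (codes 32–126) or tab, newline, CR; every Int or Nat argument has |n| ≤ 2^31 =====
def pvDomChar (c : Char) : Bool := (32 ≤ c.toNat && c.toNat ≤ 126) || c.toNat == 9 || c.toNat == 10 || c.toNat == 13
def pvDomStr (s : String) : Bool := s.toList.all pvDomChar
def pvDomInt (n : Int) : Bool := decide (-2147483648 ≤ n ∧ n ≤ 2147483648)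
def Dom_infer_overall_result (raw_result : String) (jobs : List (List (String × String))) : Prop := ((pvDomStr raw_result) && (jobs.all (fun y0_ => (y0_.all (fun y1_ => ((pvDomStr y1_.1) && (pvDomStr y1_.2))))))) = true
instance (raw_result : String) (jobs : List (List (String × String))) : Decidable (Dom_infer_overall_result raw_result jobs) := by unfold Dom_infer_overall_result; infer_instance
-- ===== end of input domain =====

-- B replaces the comprehension plus four any/all scans with one accumulating pass over jobs (alternative decomposition, same cost).

-- ===== PORT A =====
-- module constants SUCCESS_RESULTS / FAILURE_RESULTS (shared by both Pythons)
def pvSuccessResults : List String := ["success", "passed", "pass"]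
def pvFailureResults : List String := ["failed", "fail", "error", "canceled", "cancelled", "skip", "skipped"]

-- job.get("result", "") on the association list (first match, Python dict lookup)
def pvJobResult (job : List (String × String)) : String :=
  match job.find? (fun p => p.1 == "result") with
  | some p => p.2
  | none => ""

def is_failure_result (result : String) : Bool :=
  pvFailureResults.contains (PySem.Str.lower result)

def infer_overall_result (raw_result : String) (jobs : List (List (String × String))) : String :=
  let result := PySem.Str.lower (PySem.Str.strip raw_result)
  if result ≠ "" then result
  else
    let job_results := jobs.map (fun job => PySem.Str.lower (pvJobResult job))
    if job_results.any (fun item => is_failure_result item) then "failed"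
    else if job_results.any (fun item => item == "running") then "running"
    else if job_results.any (fun item => item == "pending") then "pending"
    else if !job_results.isEmpty && job_results.all (fun item => pvSuccessResults.contains item) then "success"
    else "unknown"

-- ===== PORT B =====
-- state: (has_failure, has_running, has_pending, saw_any, all_success)
def pvStep (st : Bool × Bool × Bool × Bool × Bool) (job : List (String × String)) :
    Bool × Bool × Bool × Bool × Bool :=
  let r := PySem.Str.lower (pvJobResult job)
  let hf := st.1; let hr := st.2.1; let hp := st.2.2.1; let asc := st.2.2.2.2
  if pvFailureResults.contains r then (true, hr, hp, true, asc && pvSuccessResults.contains r)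
  else if r == "running" then (hf, true, hp, true, asc && pvSuccessResults.contains r)
  else if r == "pending" then (hf, hr, true, true, asc && pvSuccessResults.contains r)
  else (hf, hr, hp, true, asc && pvSuccessResults.contains r)

def infer_overall_result_alt (raw_result : String) (jobs : List (List (String × String))) : String :=
  let result := PySem.Str.lower (PySem.Str.strip raw_result)
  if result ≠ "" then result
  else
    let st := jobs.foldl pvStep (false, false, false, false, true)
    if st.1 then "failed"
    else if st.2.1 then "running"
    else if st.2.2.1 then "pending"
    else if st.2.2.2.1 && st.2.2.2.2 then "success"
    else "unknown"

-- ===== PRECONDITION & SPEC =====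
def Spec_infer_overall_result (raw_result : String) (jobs : List (List (String × String))) (out : String) : Prop := out = infer_overall_result_alt raw_result jobs
instance (raw_result : String) (jobs : List (List (String × String))) (out : String) : Decidable (Spec_infer_overall_result raw_result jobs out) := by unfold Spec_infer_overall_result; infer_instance

-- ===== CLAIM (what is proved, stated in full; the proofs are below) =====
def Claim_equal_infer_overall_result : Prop := ∀ (raw_result : String) (jobs : List (List (String × String))), Dom_infer_overall_result raw_result jobs → Spec_infer_overall_result raw_result jobs (infer_overall_result raw_result jobs)

-- ===== LEMMAS AND PROOFS =====

theorem lowerChar_idem (c : Char) :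
    PySem.Chars.lowerChar (PySem.Chars.lowerChar c) = PySem.Chars.lowerChar c := by
  unfold PySem.Chars.lowerChar PySem.Chars.isupper
  split_ifs with h1 h2 <;> try rfl
  exfalso
  simp only [Bool.and_eq_true, decide_eq_true_eq, Char.le_def, UInt32.le_iff_toNat_le] at h1 h2
  have hA : ('A'.val.toNat) = 65 := rfl
  have hZ : ('Z'.val.toNat) = 90 := rfl
  rw [hA, hZ] at h2
  have h65 : 65 ≤ c.toNat := h1.1
  have h90 : c.toNat ≤ 90 := h1.2
  have hv : (c.toNat + 32).isValidChar := Or.inl (by omega)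
  have ht : (Char.ofNat (c.toNat + 32)).val.toNat = c.toNat + 32 := by
    have h : (Char.ofNat (c.toNat + 32)).toNat = c.toNat + 32 := by
      simp [Char.toNat_ofNat, hv]
    exact h
  rw [ht] at h2
  omega

theorem str_lower_idem (s : String) :
    PySem.Str.lower (PySem.Str.lower s) = PySem.Str.lower s := by
  apply String.toList_inj.mp
  simp [pysem, PySem.Chars.lower, List.map_map, Function.comp, lowerChar_idem]

theorem is_failure_lowered (s : String) :
    is_failure_result (PySem.Str.lower s) = pvFailureResults.contains (PySem.Str.lower s) := by
  unfold is_failure_result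
  rw [str_lower_idem]

theorem fail_not_running (r : String) (h : pvFailureResults.contains r = true) :
    (r == "running") = false := by
  simp only [pvFailureResults, List.contains_eq_mem, List.mem_cons, decide_eq_true_eq] at h
  rcases h with h|h|h|h|h|h|h|h <;> first | (subst h; decide) | simp at h

theorem fail_not_pending (r : String) (h : pvFailureResults.contains r = true) :
    (r == "pending") = false := by
  simp only [pvFailureResults, List.contains_eq_mem, List.mem_cons, decide_eq_true_eq] at h
  rcases h with h|h|h|h|h|h|h|h <;> first | (subst h; decide) | simp at h

-- one step updates the flags exactly as the scans would
theorem pvStep_eq (hf hr hp sa asc : Bool) (job : List (String × String)) :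
    pvStep (hf, hr, hp, sa, asc) job =
      (hf || pvFailureResults.contains (PySem.Str.lower (pvJobResult job)),
       hr || (PySem.Str.lower (pvJobResult job) == "running"),
       hp || (PySem.Str.lower (pvJobResult job) == "pending"),
       true,
       asc && pvSuccessResults.contains (PySem.Str.lower (pvJobResult job))) := by
  unfold pvStep
  set r := PySem.Str.lower (pvJobResult job) with hrdef
  by_cases hF : pvFailureResults.contains r = true
  · have hR := fail_not_running r hF
    have hP := fail_not_pending r hF
    simp only [List.contains_eq_mem, decide_eq_true_eq] at hF
    simp [hF, hR, hP]
  · simp only [Bool.not_eq_true, List.contains_eq_mem, decide_eq_false_iff_not] at hF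
    by_cases hR : (r == "running") = true
    · have hP : (r == "pending") = false := by
        have h := eq_of_beq hR; rw [h]; decide
      simp [hF, hR, hP]
    · simp only [Bool.not_eq_true] at hR
      by_cases hP : (r == "pending") = true
      · simp [hF, hR, hP]
      · simp only [Bool.not_eq_true] at hP
        simp [hF, hR, hP]

-- the whole fold computes the four scans at once
theorem foldl_pvStep (jobs : List (List (String × String))) (hf hr hp sa asc : Bool) :
    jobs.foldl pvStep (hf, hr, hp, sa, asc) =
      (hf || jobs.any (fun j => pvFailureResults.contains (PySem.Str.lower (pvJobResult j))),
       hr || jobs.any (fun j => PySem.Str.lower (pvJobResult j) == "running"),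
       hp || jobs.any (fun j => PySem.Str.lower (pvJobResult j) == "pending"),
       sa || !jobs.isEmpty,
       asc && jobs.all (fun j => pvSuccessResults.contains (PySem.Str.lower (pvJobResult j)))) := by
  induction jobs generalizing hf hr hp sa asc with
  | nil => simp
  | cons j js ih =>
    simp only [List.foldl_cons, pvStep_eq, ih, List.any_cons, List.all_cons, List.isEmpty_cons]
    simp [Bool.or_assoc, Bool.and_assoc]

-- ===== VERDICT (by name: the statement is the Claim_ definition above) =====
theorem infer_overall_result_spec : Claim_equal_infer_overall_result := by
  intro raw_result jobs _
  unfold Spec_infer_overall_result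
  show infer_overall_result raw_result jobs = infer_overall_result_alt raw_result jobs
  unfold infer_overall_result infer_overall_result_alt
  dsimp only
  by_cases h : PySem.Str.lower (PySem.Str.strip raw_result) ≠ ""
  · rw [if_pos h, if_pos h]
  · rw [if_neg h, if_neg h, foldl_pvStep]
    simp only [Bool.false_or, Bool.true_and, List.any_map, List.all_map, List.isEmpty_map,
      Function.comp_def, is_failure_lowered]
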